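-- pv_equiv track=rewrite | github.com/HyunKyungHan/coding_test | boj/2840.py | solution
-- ===== SOURCE A (Python) =====
-- def solution(n, record):
--     wheel = ['?'] * n
--     is_available = dict() # 같은 알파벳을 두 번 사용할 수 없음!!!
--
--     ord_a = ord('A')
--     for i in range(26):
--         is_available[chr(i+ord_a)] = True
--
--     idx = 0
--     for i in range(len(record)):
--         idx = (idx - int(record[i][0])) % n ##### wheel 범위 내의 인덱스로 조정 #####
--         if wheel[idx] == record[i][1]:
--             continue
--         if wheel[idx] != '?' or not is_available[record[i][1]]:
--                 return "!"
--         wheel[idx] = record[i][1]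
--         is_available[record[i][1]] = False
--     return ''.join(wheel[idx:]+wheel[:idx])
-- ===== SOURCE B (Python) =====
-- def solution(n, record):
--     # Walk the records BACKWARDS: the running suffix sum of rotations is each
--     # letter's distance from the final reading position, i.e. its index in the
--     # output string directly -- so no wheel rotation at the end is needed.
--     pos = {}      # letter -> output position
--     filled = {}   # output position -> letter
--     s = 0
--     for rot, letter in reversed(record):
--         p = s % n
--         s += int(rot)
--         q = pos.get(letter)
--         if q is None:
--             if p in filled:
--                 return "!"
--             pos[letter] = p
--             filled[p] = letter
--         elif q != p:
--             return "!"
--     return ''.join(filled.get(j, '?') for j in range(n))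
-- ===== Notes on version B (the rewrite author's own statement) =====
-- stated objective: alternative
-- what changed: A scans the records forwards, mutating a wheel array indexed by absolute wheel positions with a 26-key availability dict, and rotates the wheel at the end; B scans the records BACKWARDS so the running suffix sum of rotations is each letter's distance from the final position, placing letters directly at their output index via a pair of inverse dicts (letter->pos, pos->letter), so no rotation/slicing step exists at all.
-- outside the precondition, e.g. on solution(2, [('0', '?'), ('1', '?')]): A returns '??', B returns '!'; on solution(1, [('0', 'A'), ('0', 'a')]): A returns '!', B returns '!'
import Mathlib
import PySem

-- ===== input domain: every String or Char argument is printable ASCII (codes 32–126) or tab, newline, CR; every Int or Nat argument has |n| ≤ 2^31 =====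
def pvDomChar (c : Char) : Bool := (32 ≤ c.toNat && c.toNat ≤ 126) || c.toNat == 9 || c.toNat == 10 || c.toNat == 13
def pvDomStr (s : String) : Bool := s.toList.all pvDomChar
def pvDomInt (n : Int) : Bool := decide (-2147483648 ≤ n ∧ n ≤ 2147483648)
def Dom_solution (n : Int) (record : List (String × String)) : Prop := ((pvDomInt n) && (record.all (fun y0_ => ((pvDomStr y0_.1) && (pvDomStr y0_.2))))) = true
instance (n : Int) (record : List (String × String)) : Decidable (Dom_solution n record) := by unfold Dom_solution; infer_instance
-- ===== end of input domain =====

-- B scans the records BACKWARDS: the suffix sum of rotations is each letter's distance from the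
-- final reading position, so letters are placed directly at their output index via a pair of
-- inverse dicts and no wheel rotation/slicing happens at the end; objective: alternative.

-- ===== PORT A =====
-- is_available = {chr(i+ord('A')): True for i in range(26)}
def solAvail : PySem.Dict String Bool :=
  (PySem.List.pyRange 0 26 1).foldl
    (fun d i => d.insert (String.ofList [Char.ofNat (i + 65).toNat]) true) PySem.Dict.empty

-- the `for i in range(len(record))` loop with early return, state (idx, wheel, is_available)
def solLoop (n : Int) : List (String × String) → Int → List String → PySem.Dict String Bool → String
  | [], idx, wheel, _ =>
      PySem.Str.join "" (PySem.List.slice wheel (some idx) none ++ PySem.List.slice wheel none (some idx))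
  | (r, ch) :: rest, idx, wheel, avail =>
      let idx' := PySem.Int.mod (idx - (PySem.Int.ofStr? r).getD 0) n
      let cur := PySem.List.pyGetD wheel idx' "?"
      if cur = ch then solLoop n rest idx' wheel avail
      else if cur ≠ "?" ∨ avail.getD ch true = false then "!"
      else solLoop n rest idx' (PySem.List.pySetD wheel idx' ch) (avail.insert ch false)

def solution (n : Int) (record : List (String × String)) : String :=
  solLoop n record 0 (PySem.List.pyRepeat ["?"] n) solAvail

-- ===== PORT B =====
-- Source B's `for rot, letter in reversed(record)` loop, state (s, pos, filled); none = early "!" return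
def altLoop (n : Int) : List (String × String) → Int → PySem.Dict String Int → PySem.Dict Int String → Option (PySem.Dict Int String)
  | [], _, _, filled => some filled
  | (r, ch) :: rest, s, pos, filled =>
      let p := PySem.Int.mod s n
      let s' := s + (PySem.Int.ofStr? r).getD 0
      match pos.get? ch with
      | none =>
          if (filled.get? p).isSome then none
          else altLoop n rest s' (pos.insert ch p) (filled.insert p ch)
      | some q => if q = p then altLoop n rest s' pos filled else none

def solution_alt (n : Int) (record : List (String × String)) : String :=
  match altLoop n record.reverse 0 PySem.Dict.empty PySem.Dict.empty with
  | none => "!"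
  | some filled =>
      PySem.Str.join "" ((PySem.List.pyRange 0 n 1).map (fun j => filled.getD j "?"))

-- ===== PRECONDITION & SPEC =====
def LETTERS : List String :=
  ["A","B","C","D","E","F","G","H","I","J","K","L","M",
   "N","O","P","Q","R","S","T","U","V","W","X","Y","Z"]

-- Pre_ excludes: n ≤ 0 with a nonempty record (A raises ZeroDivisionError/IndexError), rotation strings
-- int() rejects (ValueError), and letter strings outside "A".."Z" (A usually raises KeyError there, and
-- where it does return — a letter equal to '?' or a conflict hit first — the corner is an artefact of
-- A's '?'-sentinel wheel and its 26-key availability dict).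
def Pre_solution (n : Int) (record : List (String × String)) : Prop :=
  (1 ≤ n ∨ record = []) ∧
  record.all (fun p => (PySem.Int.ofStr? p.1).isSome && LETTERS.contains p.2) = true
instance (n : Int) (record : List (String × String)) : Decidable (Pre_solution n record) := by
  unfold Pre_solution; infer_instance

def pvWitness_solution : Int × (List (String × String)) := (3, [("1", "A"), ("2", "B")])

def Spec_solution (n : Int) (record : List (String × String)) (out : String) : Prop := out = solution_alt n record
instance (n : Int) (record : List (String × String)) (out : String) : Decidable (Spec_solution n record out) := by unfold Spec_solution; infer_instance

-- ===== CLAIM (what is proved, stated in full; the proofs are below) =====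
def Claim_equal_solution : Prop := ∀ (n : Int) (record : List (String × String)), Dom_solution n record → Pre_solution n record → Spec_solution n record (solution n record)

-- ===== LEMMAS AND PROOFS =====

-- abstract fold over (index, letter) pairs: the shape of A's placement loop
def altCheck : List (Int × String) → PySem.Dict Int String → PySem.Set String → Option (PySem.Dict Int String)
  | [], placed, _ => some placed
  | (i, ch) :: rest, placed, used =>
      match placed.get? i with
      | none =>
          if PySem.Set.contains used ch then none
          else altCheck rest (placed.insert i ch) (PySem.Set.add used ch)
      | some prev => if prev = ch then altCheck rest placed used else none

-- the wheel list as a function of the placement dict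
def wheelOf (n : Int) (placed : PySem.Dict Int String) : List String :=
  (PySem.List.pyRange 0 n 1).map (fun i => placed.getD i "?")

-- A's landing pairs: (landing index mod n, letter), in record order
def pairsFrom (n : Int) : Int → List (String × String) → List (Int × String)
  | _, [] => []
  | total, (r, ch) :: rest =>
      let t := total + (PySem.Int.ofStr? r).getD 0
      (PySem.Int.mod (-t) n, ch) :: pairsFrom n t rest

def lastIdx (pairs : List (Int × String)) (dflt : Int) : Int :=
  match pairs.getLast? with | some p => p.1 | none => dflt

-- B's landing pairs: suffix-sum positions as computed by altLoop
def bp (n : Int) : Int → List (String × String) → List (Int × String)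
  | _, [] => []
  | s, (r, ch) :: rest => (PySem.Int.mod s n, ch) :: bp n (s + (PySem.Int.ofStr? r).getD 0) rest

def sumr : List (String × String) → Int
  | [] => 0
  | (r, _) :: rest => (PySem.Int.ofStr? r).getD 0 + sumr rest

-- first letter recorded for an index / first index recorded for a letter
def assign (l : List (Int × String)) (i : Int) : Option String :=
  (l.find? (fun p => p.1 == i)).map Prod.snd
def assignL (l : List (Int × String)) (c : String) : Option Int :=
  (l.find? (fun p => p.2 == c)).map Prod.fst

-- no two records contradict each other (same index ↔ same letter)
def consistent (l : List (Int × String)) : Prop :=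
  ∀ p ∈ l, ∀ q ∈ l, (p.1 = q.1 ↔ p.2 = q.2)

lemma lastIdx_cons (p : Int × String) (l : List (Int × String)) (d : Int) :
    lastIdx (p :: l) d = lastIdx l p.1 := by
  cases h : l.getLast? <;> simp [lastIdx, List.getLast?_cons, h]

lemma pyRange01 (n : Int) :
    PySem.List.pyRange 0 n 1 = (List.range n.toNat).map (fun k : Nat => (k : Int)) := by
  rw [PySem.List.pyRange_of_pos _ _ one_pos]
  have harg : (if (0 : Int) < n then ((n - 0 + 1 - 1) / 1).toNat else 0) = n.toNat := by
    split <;> omega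
  rw [harg]
  exact List.map_congr_left (fun k _ => by ring)

lemma wheelOf_eq (n : Int) (placed : PySem.Dict Int String) :
    wheelOf n placed = (List.range n.toNat).map (fun k : Nat => placed.getD (k : Int) "?") := by
  rw [wheelOf, pyRange01, List.map_map]; rfl

lemma wheel0 (n : Int) : PySem.List.pyRepeat ["?"] n = wheelOf n PySem.Dict.empty := by
  rw [PySem.List.pyRepeat_singleton, wheelOf_eq]
  simp [PySem.Dict.getD_empty, List.map_const']

lemma wheel_get (n i : Int) (placed : PySem.Dict Int String) (h0 : 0 ≤ i) (h1 : i < n) :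
    PySem.List.pyGetD (wheelOf n placed) i "?" = placed.getD i "?" :=
  PySem.List.pyGetD_map_pyRange_of_nonneg _ n i _ h0 h1

lemma wheel_set (n i : Int) (v : String) (placed : PySem.Dict Int String)
    (h0 : 0 ≤ i) (h1 : i < n) :
    PySem.List.pySetD (wheelOf n placed) i v = wheelOf n (placed.insert i v) := by
  have hk : i.toNat < (wheelOf n placed).length := by
    rw [wheelOf_eq]; simp; omega
  rw [PySem.List.pySetD, ← Int.toNat_of_nonneg h0, PySem.List.pySet?_natCast _ _ _ hk,
    Option.getD_some]
  rw [wheelOf_eq, wheelOf_eq]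
  apply List.ext_getElem
  · simp
  · intro j hj1 hj2
    rw [List.getElem_set]
    simp only [List.getElem_map, List.getElem_range]
    rw [PySem.Dict.getD_insert]
    by_cases h : j = i.toNat
    · rw [if_pos (Eq.symm h), if_pos (by exact_mod_cast congrArg (Nat.cast : Nat → Int) h)]
    · rw [if_neg (fun hh => h (Eq.symm hh)), if_neg (fun hh => h (by exact_mod_cast hh))]

lemma modmod (n : Int) (hn : 0 < n) (a v : Int) :
    PySem.Int.mod (PySem.Int.mod a n - v) n = PySem.Int.mod (a - v) n := by
  rw [PySem.Int.mod_eq_emod_of_pos hn, PySem.Int.mod_eq_emod_of_pos hn,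
    PySem.Int.mod_eq_emod_of_pos hn]
  conv_rhs => rw [Int.sub_emod]
  rw [Int.sub_emod, Int.emod_emod_of_dvd _ dvd_rfl]

lemma mod_absorb (n : Int) (hn : 0 < n) (C d : Int) :
    PySem.Int.mod (C + PySem.Int.mod d n) n = PySem.Int.mod (C + d) n := by
  rw [PySem.Int.mod_eq_emod_of_pos hn, PySem.Int.mod_eq_emod_of_pos hn,
    PySem.Int.mod_eq_emod_of_pos hn]
  conv_lhs => rw [Int.add_emod]
  conv_rhs => rw [Int.add_emod]
  rw [Int.emod_emod_of_dvd _ dvd_rfl]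

lemma availInit_aux (g : Int → String) (l : List Int) :
    ∀ (d : PySem.Dict String Bool), (∀ c, d.getD c true = true) →
      ∀ c, (l.foldl (fun d i => d.insert (g i) true) d).getD c true = true := by
  induction l with
  | nil => intro d h c; exact h c
  | cons i rest ih =>
      intro d h c
      simp only [List.foldl_cons]
      refine ih _ (fun c => ?_) c
      rw [PySem.Dict.getD_insert]
      split <;> simp [h]

lemma availInit (c : String) : solAvail.getD c true = true :=
  availInit_aux _ _ PySem.Dict.empty (fun c => PySem.Dict.getD_empty c true) c

lemma letters_ne_q : ∀ s ∈ LETTERS, s ≠ "?" := by decide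

lemma contains_add_false {used : PySem.Set String} {ch : String}
    (h : PySem.Set.contains used ch = false) (c : String) :
    PySem.Set.contains (PySem.Set.add used ch) c = (PySem.Set.contains used c || c == ch) := by
  simp [PySem.Set.add, PySem.Set.contains, List.contains_eq_mem] at *
  rw [if_neg h]
  by_cases h1 : c ∈ used <;> by_cases h2 : c = ch <;> simp [h1, h2]

lemma main (n : Int) (hn : 0 < n) (rest : List (String × String)) :
    ∀ (total : Int) (placed : PySem.Dict Int String) (used : PySem.Set String)
      (avail : PySem.Dict String Bool),
      (∀ p ∈ rest, (PySem.Int.ofStr? p.1).isSome ∧ p.2 ∈ LETTERS) →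
      (∀ c, avail.getD c true = !(PySem.Set.contains used c)) →
      (∀ i c, placed.get? i = some c → c ∈ LETTERS) →
      solLoop n rest (PySem.Int.mod (-total) n) (wheelOf n placed) avail =
        (match altCheck (pairsFrom n total rest) placed used with
         | none => "!"
         | some placed' =>
             PySem.Str.join ""
               (PySem.List.slice (wheelOf n placed')
                  (some (lastIdx (pairsFrom n total rest) (PySem.Int.mod (-total) n))) none ++
                PySem.List.slice (wheelOf n placed') none
                  (some (lastIdx (pairsFrom n total rest) (PySem.Int.mod (-total) n))))) := by
  induction rest with
  | nil =>
      intro total placed used avail _ _ _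
      simp [solLoop, pairsFrom, altCheck, lastIdx]
  | cons p rest ih =>
      obtain ⟨r, ch⟩ := p
      intro total placed used avail hrec hav hpl
      have hch : ch ∈ LETTERS := (hrec (r, ch) (by simp)).2
      set v := (PySem.Int.ofStr? r).getD 0 with hv
      have hidx : PySem.Int.mod (PySem.Int.mod (-total) n - v) n
          = PySem.Int.mod (-(total + v)) n := by
        rw [modmod n hn]; ring_nf
      have h0 : 0 ≤ PySem.Int.mod (-(total + v)) n := PySem.Int.mod_nonneg _ hn
      have h1 : PySem.Int.mod (-(total + v)) n < n := PySem.Int.mod_lt _ hn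
      simp only [solLoop, pairsFrom]
      simp only [← hv]
      rw [hidx, wheel_get n _ placed h0 h1]
      cases hp : placed.get? (PySem.Int.mod (-(total + v)) n) with
      | some prev =>
          rw [PySem.Dict.getD_of_get?_eq_some placed _ hp]
          by_cases hpc : prev = ch
          · rw [if_pos hpc]
            rw [ih (total + v) placed used avail
              (fun q hq => hrec q (by simp [hq])) hav hpl]
            simp only [altCheck, hp, if_pos hpc, lastIdx_cons]
          · rw [if_neg hpc, if_pos (Or.inl (letters_ne_q prev (hpl _ _ hp)))]
            simp only [altCheck, hp, if_neg hpc]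
      | none =>
          rw [PySem.Dict.getD_of_get?_eq_none placed _ hp]
          rw [if_neg (fun h => letters_ne_q ch hch h.symm)]
          cases hc : PySem.Set.contains used ch with
          | true =>
              rw [if_pos (Or.inr (by rw [hav ch, hc]; rfl))]
              simp only [altCheck, hp, hc, if_pos]
          | false =>
              rw [if_neg (by rw [hav ch, hc]; simp)]
              rw [wheel_set n _ ch placed h0 h1]
              rw [ih (total + v) (placed.insert _ ch) (PySem.Set.add used ch)
                (avail.insert ch false)
                (fun q hq => hrec q (by simp [hq]))
                (fun c => by
                  rw [PySem.Dict.getD_insert, contains_add_false hc c]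
                  by_cases hcc : c = ch
                  · simp [hcc]
                  · simp [hcc, hav c])
                (fun i c h => by
                  rw [PySem.Dict.get?_insert] at h
                  split at h
                  · exact (Option.some.injEq _ _ ▸ h) ▸ hch
                  · exact hpl _ _ h)]
              simp only [altCheck, hp]
              rw [if_neg (by rw [hc]; exact Bool.false_ne_true)]
              simp only [lastIdx_cons]

-- ===== assign / consistent toolbox =====

lemma mem_of_assign_eq_some {l : List (Int × String)} {i : Int} {c : String}
    (h : assign l i = some c) : (i, c) ∈ l := by
  unfold assign at h
  cases hf : l.find? (fun p => p.1 == i) with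
  | none => rw [hf] at h; simp at h
  | some p =>
      rw [hf] at h
      have hm := List.mem_of_find?_eq_some hf
      have hp := List.find?_some hf
      simp at hp h
      obtain ⟨p1, p2⟩ := p
      simp_all

lemma assign_eq_some_of_mem {l : List (Int × String)} {i : Int} {c : String}
    (hcon : consistent l) (hm : (i, c) ∈ l) : assign l i = some c := by
  have hs : (l.find? (fun p => p.1 == i)).isSome := by
    rw [List.find?_isSome]; exact ⟨(i, c), hm, by simp⟩
  cases hf : l.find? (fun p => p.1 == i) with
  | none => rw [hf] at hs; simp at hs
  | some p =>
      have hpm := List.mem_of_find?_eq_some hf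
      have hp := List.find?_some hf
      simp at hp
      have := (hcon p hpm (i, c) hm).1 (by simpa using hp)
      unfold assign; rw [hf]; simp [this]

lemma assign_eq_none_iff {l : List (Int × String)} {i : Int} :
    assign l i = none ↔ ∀ c, (i, c) ∉ l := by
  unfold assign
  rw [Option.map_eq_none_iff, List.find?_eq_none]
  constructor
  · intro h c hc
    have := h _ hc; simp at this
  · intro h p hp
    obtain ⟨p1, p2⟩ := p
    simp only [beq_iff_eq]
    intro he; exact h p2 (he ▸ hp)

lemma memL_of_assignL_eq_some {l : List (Int × String)} {c : String} {i : Int}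
    (h : assignL l c = some i) : (i, c) ∈ l := by
  unfold assignL at h
  cases hf : l.find? (fun p => p.2 == c) with
  | none => rw [hf] at h; simp at h
  | some p =>
      rw [hf] at h
      have hm := List.mem_of_find?_eq_some hf
      have hp := List.find?_some hf
      simp at hp h
      obtain ⟨p1, p2⟩ := p
      simp_all

lemma assignL_eq_none_iff {l : List (Int × String)} {c : String} :
    assignL l c = none ↔ ∀ i, (i, c) ∉ l := by
  unfold assignL
  rw [Option.map_eq_none_iff, List.find?_eq_none]
  constructor
  · intro h i hi
    have := h _ hi; simp at this
  · intro h p hp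
    obtain ⟨p1, p2⟩ := p
    simp only [beq_iff_eq]
    intro he; exact h p1 (he ▸ hp)

lemma consistent_congr {l1 l2 : List (Int × String)} (h : ∀ x, x ∈ l1 ↔ x ∈ l2) :
    consistent l1 ↔ consistent l2 :=
  ⟨fun hc p hp q hq => hc p ((h p).2 hp) q ((h q).2 hq),
   fun hc p hp q hq => hc p ((h p).1 hp) q ((h q).1 hq)⟩

lemma mem_dup_iff {pre rest : List (Int × String)} {x : Int × String} (hx : x ∈ pre) :
    ∀ y, y ∈ pre ++ x :: rest ↔ y ∈ pre ++ rest := by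
  intro y
  simp only [List.mem_append, List.mem_cons]
  constructor
  · rintro (h | h | h)
    · exact Or.inl h
    · exact Or.inl (h ▸ hx)
    · exact Or.inr h
  · rintro (h | h)
    · exact Or.inl h
    · exact Or.inr (Or.inr h)

lemma assign_append (l1 l2 : List (Int × String)) (i : Int) :
    assign (l1 ++ l2) i = (assign l1 i).or (assign l2 i) := by
  unfold assign
  rw [List.find?_append]
  cases l1.find? (fun p => p.1 == i) <;> simp

lemma assign_dup {pre rest : List (Int × String)} {x : Int × String} (hx : x ∈ pre) (i : Int) :
    assign (pre ++ x :: rest) i = assign (pre ++ rest) i := by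
  rw [assign_append, assign_append]
  cases hf : assign pre i with
  | some c => simp
  | none =>
      simp only [Option.none_or]
      unfold assign
      rw [List.find?_cons]
      have hnx : ¬ (x.1 == i) = true := by
        intro h
        simp at h
        exact (assign_eq_none_iff.1 hf) x.2 (by rw [← h]; exact hx)
      simp [hnx]

lemma assign_append_singleton (pre : List (Int × String)) (i : Int) (ch : String) (i' : Int) :
    assign (pre ++ [(i, ch)]) i' =
      (assign pre i').or (if i' = i then some ch else none) := by
  rw [assign_append]
  congr 1
  unfold assign
  by_cases h : i' = i
  · subst h; rw [List.find?_cons_of_pos (by simp), if_pos rfl]; rfl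
  · rw [List.find?_cons_of_neg (by simp; exact fun hh => h hh.symm),
      List.find?_nil, if_neg h]; rfl

lemma assignL_append_singleton (pre : List (Int × String)) (i : Int) (ch : String) (c : String) :
    assignL (pre ++ [(i, ch)]) c =
      (assignL pre c).or (if c = ch then some i else none) := by
  unfold assignL
  rw [List.find?_append]
  cases hf : pre.find? (fun p => p.2 == c) with
  | some p => simp
  | none =>
      simp only [Option.none_or]
      by_cases h : c = ch
      · subst h; rw [List.find?_cons_of_pos (by simp), if_pos rfl]; rfl
      · rw [List.find?_cons_of_neg (by simp; exact fun hh => h hh.symm),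
          List.find?_nil, if_neg h]; rfl

lemma consistent_append_singleton {pre : List (Int × String)} {i : Int} {ch : String}
    (hcon : consistent pre) (hi : ∀ c, (i, c) ∉ pre) (hch : ∀ i', (i', ch) ∉ pre) :
    consistent (pre ++ [(i, ch)]) := by
  intro p hp q hq
  simp only [List.mem_append, List.mem_singleton] at hp hq
  obtain ⟨p1, p2⟩ := p; obtain ⟨q1, q2⟩ := q
  rcases hp with hp | hp <;> rcases hq with hq | hq
  · exact hcon _ hp _ hq
  · rw [Prod.mk.injEq] at hq
    obtain ⟨rfl, rfl⟩ := hq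
    constructor
    · intro h; subst h; exact absurd hp (hi p2)
    · intro h; subst h; exact absurd hp (hch p1)
  · rw [Prod.mk.injEq] at hp
    obtain ⟨rfl, rfl⟩ := hp
    constructor
    · intro h; subst h; exact absurd hq (hi q2)
    · intro h; subst h; exact absurd hq (hch q1)
  · rw [Prod.mk.injEq] at hp hq
    obtain ⟨rfl, rfl⟩ := hp; obtain ⟨rfl, rfl⟩ := hq
    simp

-- ===== characterisation of the abstract A-side fold =====

lemma altCheck_char :
    ∀ (ps pre : List (Int × String)) (placed : PySem.Dict Int String) (used : PySem.Set String),
      consistent pre →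
      (∀ i, placed.get? i = assign pre i) →
      (∀ c, PySem.Set.contains used c = true ↔ ∃ i, (i, c) ∈ pre) →
      (consistent (pre ++ ps) →
        ∃ d, altCheck ps placed used = some d ∧ ∀ i, d.get? i = assign (pre ++ ps) i) ∧
      (¬ consistent (pre ++ ps) → altCheck ps placed used = none) := by
  intro ps
  induction ps with
  | nil =>
      intro pre placed used hcon hpl _
      refine ⟨fun _ => ⟨placed, rfl, fun i => by simpa using hpl i⟩, fun h => absurd (by simpa using hcon) h⟩
  | cons x rest ih =>
      obtain ⟨i, ch⟩ := x
      intro pre placed used hcon hpl hused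
      simp only [altCheck]
      cases hp : placed.get? i with
      | some prev =>
          simp only []
          have hprev : (i, prev) ∈ pre := mem_of_assign_eq_some (by rw [← hpl i]; exact hp)
          by_cases hpc : prev = ch
          · subst hpc
            rw [if_pos rfl]
            have hmem := mem_dup_iff (rest := rest) hprev
            obtain ⟨h1, h2⟩ := ih pre placed used hcon hpl hused
            constructor
            · intro hc
              obtain ⟨d, hd1, hd2⟩ := h1 ((consistent_congr hmem).1 hc)
              exact ⟨d, hd1, fun i' => (hd2 i').trans (assign_dup hprev i').symm⟩
            · intro hnc
              exact h2 (fun h => hnc ((consistent_congr hmem).2 h))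
          · rw [if_neg hpc]
            have hnc : ¬ consistent (pre ++ (i, ch) :: rest) := by
              intro hc
              exact hpc ((hc (i, prev) (List.mem_append_left _ hprev)
                (i, ch) (List.mem_append_right _ (List.mem_cons_self))).1 rfl)
            exact ⟨fun hc => absurd hc hnc, fun _ => rfl⟩
      | none =>
          simp only []
          have hnone : ∀ c, (i, c) ∉ pre :=
            assign_eq_none_iff.1 (by rw [← hpl i]; exact hp)
          cases hc : PySem.Set.contains used ch with
          | true =>
              rw [if_pos rfl]
              obtain ⟨i', hi'⟩ := (hused ch).1 hc
              have hnc : ¬ consistent (pre ++ (i, ch) :: rest) := by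
                intro hcc
                have h2 : i' = i := by
                  simpa using (hcc (i', ch) (List.mem_append_left _ hi')
                    (i, ch) (List.mem_append_right _ (List.mem_cons_self))).2 rfl
                exact hnone ch (by rw [← h2]; exact hi')
              exact ⟨fun hcx => absurd hcx hnc, fun _ => rfl⟩
          | false =>
              rw [if_neg (by simp)]
              have hchf : ∀ i', (i', ch) ∉ pre := by
                intro i' hi'
                exact absurd ((hused ch).2 ⟨i', hi'⟩) (by rw [hc]; exact Bool.false_ne_true)
              have hcon' : consistent (pre ++ [(i, ch)]) :=
                consistent_append_singleton hcon hnone hchf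
              have hpl' : ∀ i', (placed.insert i ch).get? i' = assign (pre ++ [(i, ch)]) i' := by
                intro i'
                rw [PySem.Dict.get?_insert, assign_append_singleton]
                by_cases h : i' = i
                · subst h
                  rw [if_pos rfl, if_pos rfl, ← hpl i', hp]; rfl
                · rw [if_neg h, if_neg h, hpl i']; simp
              have hused' : ∀ c, PySem.Set.contains (PySem.Set.add used ch) c = true ↔
                  ∃ i', (i', c) ∈ pre ++ [(i, ch)] := by
                intro c
                rw [contains_add_false hc c]
                simp only [List.mem_append, List.mem_singleton, Prod.mk.injEq]
                constructor
                · intro h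
                  rcases Bool.or_eq_true_iff.1 h with h | h
                  · obtain ⟨i', hi'⟩ := (hused c).1 h
                    exact ⟨i', Or.inl hi'⟩
                  · exact ⟨i, Or.inr ⟨rfl, by simpa using h⟩⟩
                · rintro ⟨i', hi' | ⟨rfl, rfl⟩⟩
                  · exact Bool.or_eq_true_iff.2 (Or.inl ((hused c).2 ⟨i', hi'⟩))
                  · simp
              have heq : pre ++ [(i, ch)] ++ rest = pre ++ (i, ch) :: rest := by simp
              obtain ⟨h1, h2⟩ := ih (pre ++ [(i, ch)]) (placed.insert i ch)
                (PySem.Set.add used ch) hcon' hpl' hused'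
              rw [heq] at h1 h2
              exact ⟨h1, h2⟩

-- ===== characterisation of B's reverse loop =====

lemma altLoop_char (n : Int) :
    ∀ (l : List (String × String)) (pre : List (Int × String)) (s : Int)
      (pos : PySem.Dict String Int) (filled : PySem.Dict Int String),
      consistent pre →
      (∀ c, pos.get? c = assignL pre c) →
      (∀ i, filled.get? i = assign pre i) →
      (consistent (pre ++ bp n s l) →
        ∃ d, altLoop n l s pos filled = some d ∧ ∀ i, d.get? i = assign (pre ++ bp n s l) i) ∧
      (¬ consistent (pre ++ bp n s l) → altLoop n l s pos filled = none) := by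
  intro l
  induction l with
  | nil =>
      intro pre s pos filled hcon _ hfil
      refine ⟨fun _ => ⟨filled, rfl, fun i => by simpa [bp] using hfil i⟩,
        fun h => absurd (by simpa [bp] using hcon) h⟩
  | cons x rest ih =>
      obtain ⟨r, ch⟩ := x
      intro pre s pos filled hcon hpos hfil
      simp only [altLoop, bp]
      set p := PySem.Int.mod s n with hpdef
      set s' := s + (PySem.Int.ofStr? r).getD 0 with hsdef
      cases hq : pos.get? ch with
      | some q =>
          simp only []
          have hqm : (q, ch) ∈ pre := memL_of_assignL_eq_some (by rw [← hpos ch]; exact hq)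
          by_cases hqp : q = p
          · subst hqp
            rw [if_pos rfl]
            have hmem := mem_dup_iff (rest := bp n s' rest) hqm
            obtain ⟨h1, h2⟩ := ih pre s' pos filled hcon hpos hfil
            constructor
            · intro hc
              obtain ⟨d, hd1, hd2⟩ := h1 ((consistent_congr hmem).1 hc)
              exact ⟨d, hd1, fun i' => (hd2 i').trans (assign_dup hqm i').symm⟩
            · intro hnc
              exact h2 (fun h => hnc ((consistent_congr hmem).2 h))
          · rw [if_neg hqp]
            have hnc : ¬ consistent (pre ++ (p, ch) :: bp n s' rest) := by
              intro hc
              exact hqp ((hc (q, ch) (List.mem_append_left _ hqm)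
                (p, ch) (List.mem_append_right _ (List.mem_cons_self))).2 rfl)
            exact ⟨fun hcx => absurd hcx hnc, fun _ => rfl⟩
      | none =>
          simp only []
          have hchf : ∀ i', (i', ch) ∉ pre :=
            assignL_eq_none_iff.1 (by rw [← hpos ch]; exact hq)
          cases hf : filled.get? p with
          | some c =>
              simp only [Option.isSome_some, if_true]
              have hcm : (p, c) ∈ pre := mem_of_assign_eq_some (by rw [← hfil p]; exact hf)
              have hnc : ¬ consistent (pre ++ (p, ch) :: bp n s' rest) := by
                intro hcc
                have h2 : c = ch := by
                  simpa using (hcc (p, c) (List.mem_append_left _ hcm)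
                    (p, ch) (List.mem_append_right _ (List.mem_cons_self))).1 rfl
                exact hchf p (by rw [h2] at hcm; exact hcm)
              exact ⟨fun hcx => absurd hcx hnc, fun _ => trivial⟩
          | none =>
              simp only [Option.isSome_none, Bool.false_eq_true, if_false]
              have hpnone : ∀ c, (p, c) ∉ pre :=
                assign_eq_none_iff.1 (by rw [← hfil p]; exact hf)
              have hcon' : consistent (pre ++ [(p, ch)]) :=
                consistent_append_singleton hcon hpnone hchf
              have hpos' : ∀ c, (pos.insert ch p).get? c = assignL (pre ++ [(p, ch)]) c := by
                intro c
                rw [PySem.Dict.get?_insert, assignL_append_singleton]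
                by_cases h : c = ch
                · subst h
                  rw [if_pos rfl, if_pos rfl, ← hpos c, hq]; rfl
                · rw [if_neg h, if_neg h, hpos c]; simp
              have hfil' : ∀ i', (filled.insert p ch).get? i' = assign (pre ++ [(p, ch)]) i' := by
                intro i'
                rw [PySem.Dict.get?_insert, assign_append_singleton]
                by_cases h : i' = p
                · subst h
                  rw [if_pos rfl, if_pos rfl, ← hfil p, hf]; rfl
                · rw [if_neg h, if_neg h, hfil i']; simp
              have heq : pre ++ [(p, ch)] ++ bp n s' rest = pre ++ (p, ch) :: bp n s' rest := by simp
              obtain ⟨h1, h2⟩ := ih (pre ++ [(p, ch)]) s' (pos.insert ch p)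
                (filled.insert p ch) hcon' hpos' hfil'
              rw [heq] at h1 h2
              exact ⟨h1, h2⟩

-- ===== relating B's pairs to A's pairs =====

lemma sumr_append (l1 l2 : List (String × String)) : sumr (l1 ++ l2) = sumr l1 + sumr l2 := by
  induction l1 with
  | nil => simp [sumr]
  | cons x rest ih => obtain ⟨r, c⟩ := x; simp [sumr, ih]; ring

lemma sumr_reverse (l : List (String × String)) : sumr l.reverse = sumr l := by
  induction l with
  | nil => rfl
  | cons x rest ih =>
      obtain ⟨r, c⟩ := x
      rw [List.reverse_cons, sumr_append, ih]
      simp [sumr]; ring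

lemma bp_append (n : Int) (l1 l2 : List (String × String)) :
    ∀ s, bp n s (l1 ++ l2) = bp n s l1 ++ bp n (s + sumr l1) l2 := by
  induction l1 with
  | nil => intro s; simp [bp, sumr]
  | cons x rest ih =>
      obtain ⟨r, c⟩ := x
      intro s
      simp only [List.cons_append, bp, sumr, ih]
      rw [show s + ((PySem.Int.ofStr? r).getD 0 + sumr rest)
        = s + (PySem.Int.ofStr? r).getD 0 + sumr rest by ring]

lemma bp_rev (n : Int) (hn : 0 < n) :
    ∀ (rs : List (String × String)) (s t : Int),
      bp n s rs.reverse =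
        ((pairsFrom n t rs).map
          (fun p => (PySem.Int.mod (s + sumr rs + t + p.1) n, p.2))).reverse := by
  intro rs
  induction rs with
  | nil => intro s t; simp [bp, pairsFrom]
  | cons x rest ih =>
      obtain ⟨r, ch⟩ := x
      intro s t
      set v := (PySem.Int.ofStr? r).getD 0 with hv
      rw [List.reverse_cons, bp_append, sumr_reverse]
      simp only [pairsFrom, ← hv, List.map_cons, List.reverse_cons]
      congr 1
      · rw [ih s (t + v)]
        congr 1
        apply List.map_congr_left
        intro p _
        congr 2
        rw [show sumr ((r, ch) :: rest) = v + sumr rest from by simp [sumr, ← hv]]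
        ring
      · simp only [bp]
        congr 2
        rw [show sumr ((r, ch) :: rest) = v + sumr rest from by simp [sumr, ← hv]]
        rw [mod_absorb n hn]
        ring_nf

lemma pairsFrom_bounds (n : Int) (hn : 0 < n) :
    ∀ (rs : List (String × String)) (t : Int) (p : Int × String),
      p ∈ pairsFrom n t rs → 0 ≤ p.1 ∧ p.1 < n := by
  intro rs
  induction rs with
  | nil => intro t p hp; simp [pairsFrom] at hp
  | cons x rest ih =>
      obtain ⟨r, ch⟩ := x
      intro t p hp
      simp only [pairsFrom, List.mem_cons] at hp
      rcases hp with hp | hp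
      · subst hp; exact ⟨PySem.Int.mod_nonneg _ hn, PySem.Int.mod_lt _ hn⟩
      · exact ih _ p hp

lemma lastIdx_pairsFrom (n : Int) (_hn : 0 < n) :
    ∀ (rs : List (String × String)) (t : Int),
      lastIdx (pairsFrom n t rs) (PySem.Int.mod (-t) n) = PySem.Int.mod (-(t + sumr rs)) n := by
  intro rs
  induction rs with
  | nil => intro t; simp [pairsFrom, lastIdx, sumr]
  | cons x rest ih =>
      obtain ⟨r, ch⟩ := x
      intro t
      set v := (PySem.Int.ofStr? r).getD 0 with hv
      simp only [pairsFrom, ← hv, lastIdx_cons]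
      rw [ih (t + v)]
      congr 1
      simp [sumr, ← hv]; ring

lemma mod_shift_inj (n : Int) (hn : 0 < n) (C a b : Int)
    (ha0 : 0 ≤ a) (ha1 : a < n) (hb0 : 0 ≤ b) (hb1 : b < n)
    (h : PySem.Int.mod (C + a) n = PySem.Int.mod (C + b) n) : a = b := by
  rw [PySem.Int.mod_eq_emod_of_pos hn, PySem.Int.mod_eq_emod_of_pos hn] at h
  have h2 : (a - b) % n = 0 := by
    have e := Int.sub_emod (C + a) (C + b) n
    rw [h, sub_self, show C + a - (C + b) = a - b from by ring] at e
    simpa using e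
  have hd : n ∣ (a - b) := Int.dvd_of_emod_eq_zero h2
  have := Int.eq_zero_of_abs_lt_dvd hd (by rw [abs_lt]; omega)
  omega

lemma mod_small (n : Int) (hn : 0 < n) (j : Int) (h0 : 0 ≤ j) (h1 : j < n) :
    PySem.Int.mod j n = j := by
  rw [PySem.Int.mod_eq_emod_of_pos hn]
  exact Int.emod_eq_of_lt h0 h1

-- abbreviations used by the transfer lemmas
lemma mem_bpairs (n : Int) (hn : 0 < n) (record : List (String × String)) (x : Int × String) :
    x ∈ bp n 0 record.reverse ↔
      ∃ q ∈ pairsFrom n 0 record, x = (PySem.Int.mod (sumr record + q.1) n, q.2) := by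
  rw [bp_rev n hn record 0 0, List.mem_reverse, List.mem_map]
  constructor
  · rintro ⟨q, hq, rfl⟩
    exact ⟨q, hq, by rw [show (0 : Int) + sumr record + 0 + q.1 = sumr record + q.1 from by ring]⟩
  · rintro ⟨q, hq, rfl⟩
    exact ⟨q, hq, by rw [show (0 : Int) + sumr record + 0 + q.1 = sumr record + q.1 from by ring]⟩

lemma consistent_transfer (n : Int) (hn : 0 < n) (record : List (String × String)) :
    consistent (pairsFrom n 0 record) ↔ consistent (bp n 0 record.reverse) := by
  set tot := sumr record with htot
  constructor
  · intro h p hp q hq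
    obtain ⟨p', hp', rfl⟩ := (mem_bpairs n hn record p).1 hp
    obtain ⟨q', hq', rfl⟩ := (mem_bpairs n hn record q).1 hq
    obtain ⟨hp0, hp1⟩ := pairsFrom_bounds n hn record 0 p' hp'
    obtain ⟨hq0, hq1⟩ := pairsFrom_bounds n hn record 0 q' hq'
    simp only
    constructor
    · intro he
      exact (h p' hp' q' hq').1 (mod_shift_inj n hn tot _ _ hp0 hp1 hq0 hq1 he)
    · intro he
      rw [(h p' hp' q' hq').2 he]
  · intro h p hp q hq
    have hpb := (mem_bpairs n hn record _).2 ⟨p, hp, rfl⟩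
    have hqb := (mem_bpairs n hn record _).2 ⟨q, hq, rfl⟩
    have := h _ hpb _ hqb
    simp only at this
    obtain ⟨hp0, hp1⟩ := pairsFrom_bounds n hn record 0 p hp
    obtain ⟨hq0, hq1⟩ := pairsFrom_bounds n hn record 0 q hq
    constructor
    · intro he; exact this.1 (he ▸ rfl)
    · intro he
      exact mod_shift_inj n hn tot _ _ hp0 hp1 hq0 hq1 (this.2 he)

lemma assign_transfer (n : Int) (hn : 0 < n) (record : List (String × String))
    (hcon : consistent (pairsFrom n 0 record)) (j : Int) (hj0 : 0 ≤ j) (hj1 : j < n) :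
    assign (bp n 0 record.reverse) j =
      assign (pairsFrom n 0 record) (PySem.Int.mod (PySem.Int.mod (-(sumr record)) n + j) n) := by
  set tot := sumr record with htot
  have hbcon := (consistent_transfer n hn record).1 hcon
  have hkey : PySem.Int.mod (tot + PySem.Int.mod (PySem.Int.mod (-tot) n + j) n) n = j := by
    rw [mod_absorb n hn, show tot + (PySem.Int.mod (-tot) n + j) = tot + j + PySem.Int.mod (-tot) n
      from by ring, mod_absorb n hn,
      show tot + j + -tot = j from by ring, mod_small n hn j hj0 hj1]
  have hf0 : 0 ≤ PySem.Int.mod (PySem.Int.mod (-tot) n + j) n := PySem.Int.mod_nonneg _ hn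
  have hf1 : PySem.Int.mod (PySem.Int.mod (-tot) n + j) n < n := PySem.Int.mod_lt _ hn
  cases ha : assign (pairsFrom n 0 record) (PySem.Int.mod (PySem.Int.mod (-tot) n + j) n) with
  | some c =>
      have hm := mem_of_assign_eq_some ha
      have : (j, c) ∈ bp n 0 record.reverse := by
        rw [mem_bpairs n hn record]
        exact ⟨_, hm, by rw [hkey]⟩
      exact assign_eq_some_of_mem hbcon this
  | none =>
      rw [assign_eq_none_iff]
      intro c hc
      obtain ⟨q, hq, he⟩ := (mem_bpairs n hn record _).1 hc
      rw [Prod.mk.injEq] at he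
      obtain ⟨he1, he2⟩ := he
      obtain ⟨hq0, hq1⟩ := pairsFrom_bounds n hn record 0 q hq
      have : q.1 = PySem.Int.mod (PySem.Int.mod (-tot) n + j) n := by
        apply mod_shift_inj n hn tot _ _ hq0 hq1 hf0 hf1
        rw [← he1, hkey]
      rw [assign_eq_none_iff] at ha
      exact ha c (by rw [← this, he2]; simpa using hq)

-- ===== the two renderings agree =====

lemma wheelOf_getElem (n : Int) (placed : PySem.Dict Int String) (k : Nat)
    (h : k < (wheelOf n placed).length) :
    (wheelOf n placed)[k] = placed.getD (k : Int) "?" := by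
  rw [List.getElem_of_eq (wheelOf_eq n placed)]
  simp

lemma render_eq (n : Int) (hn : 0 < n) (placed : PySem.Dict Int String)
    (filled : PySem.Dict Int String) (f : Int) (hf0 : 0 ≤ f) (hf1 : f < n)
    (h : ∀ j : Int, 0 ≤ j → j < n →
      filled.get? j = placed.get? (PySem.Int.mod (f + j) n)) :
    PySem.List.slice (wheelOf n placed) (some f) none ++
      PySem.List.slice (wheelOf n placed) none (some f) =
    (PySem.List.pyRange 0 n 1).map (fun j => filled.getD j "?") := by
  rw [PySem.List.slice_from _ hf0, PySem.List.slice_to _ hf0]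
  have hlen : (wheelOf n placed).length = n.toNat := by rw [wheelOf_eq]; simp
  rw [← List.rotate_eq_drop_append_take (by rw [hlen]; omega)]
  rw [pyRange01, List.map_map]
  apply List.ext_getElem
  · simp [hlen]
  · intro k hk1 hk2
    have hk : k < n.toNat := by simpa using hk2
    rw [List.getElem_rotate, wheelOf_getElem, hlen]
    simp only [List.getElem_map, List.getElem_range, Function.comp_apply]
    have hkn : (k : Int) < n := by
      have := (Nat.cast_lt (α := Int)).2 hk
      rwa [Int.toNat_of_nonneg (le_of_lt hn)] at this
    rw [PySem.Dict.getD_eq_get?_getD, PySem.Dict.getD_eq_get?_getD,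
      h (k : Int) (by positivity) hkn]
    have hidx2 : (((k + f.toNat) % n.toNat : Nat) : Int) = PySem.Int.mod (f + (k : Int)) n := by
      rw [PySem.Int.mod_eq_emod_of_pos hn]
      push_cast
      rw [Int.toNat_of_nonneg hf0, Int.toNat_of_nonneg (le_of_lt hn)]
      rw [add_comm]
    rw [hidx2]

-- solution = abstract fold + rotated render
lemma sol_eq_mid (n : Int) (hn : 1 ≤ n) (record : List (String × String))
    (hrec : ∀ p ∈ record, (PySem.Int.ofStr? p.1).isSome ∧ p.2 ∈ LETTERS) :
    solution n record =
      match altCheck (pairsFrom n 0 record) PySem.Dict.empty PySem.Set.empty with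
      | none => "!"
      | some placed =>
          PySem.Str.join ""
            (PySem.List.slice (wheelOf n placed)
              (some (PySem.Int.mod (-(sumr record)) n)) none ++
             PySem.List.slice (wheelOf n placed) none
              (some (PySem.Int.mod (-(sumr record)) n))) := by
  have hn0 : (0 : Int) < n := by omega
  have h0 : (0 : Int) = PySem.Int.mod (-(0 : Int)) n := by
    rw [PySem.Int.mod_eq_emod_of_pos hn0]; simp
  have hmain := main n hn0 record 0 PySem.Dict.empty PySem.Set.empty solAvail
    hrec
    (fun c => by rw [availInit c]; simp [PySem.Set.contains])
    (fun i c h => by simp [PySem.Dict.get?_empty] at h)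
  have hl := lastIdx_pairsFrom n hn0 record 0
  rw [show -((0 : Int) + sumr record) = -(sumr record) from by ring] at hl
  rw [hl, ← h0] at hmain
  rw [solution, wheel0, hmain]

-- ===== VERDICT (by name: the statement is the Claim_ definition above) =====
theorem solution_spec : Claim_equal_solution := by
  intro n record _ hpre
  obtain ⟨hn, hall⟩ := hpre
  unfold Spec_solution
  by_cases hpos : 1 ≤ n
  · have hn0 : (0 : Int) < n := by omega
    have hrec : ∀ p ∈ record, (PySem.Int.ofStr? p.1).isSome ∧ p.2 ∈ LETTERS := by
      intro p hp
      have := List.all_eq_true.mp hall p hp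
      simp only [Bool.and_eq_true, List.contains_eq_mem, decide_eq_true_eq] at this
      exact ⟨this.1, this.2⟩
    have hAc := altCheck_char (pairsFrom n 0 record) [] PySem.Dict.empty PySem.Set.empty
      (by intro p hp; simp at hp)
      (fun i => by simp [PySem.Dict.get?_empty, assign, List.find?])
      (fun c => by simp [PySem.Set.contains, PySem.Set.empty])
    have hBc := altLoop_char n record.reverse [] 0 PySem.Dict.empty PySem.Dict.empty
      (by intro p hp; simp at hp)
      (fun c => by simp [PySem.Dict.get?_empty, assignL, List.find?])
      (fun i => by simp [PySem.Dict.get?_empty, assign, List.find?])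
    simp only [List.nil_append] at hAc hBc
    rw [sol_eq_mid n hpos record hrec]
    unfold solution_alt
    by_cases hcon : consistent (pairsFrom n 0 record)
    · have hbcon := (consistent_transfer n hn0 record).1 hcon
      obtain ⟨dA, hA1, hA2⟩ := hAc.1 hcon
      obtain ⟨dB, hB1, hB2⟩ := hBc.1 hbcon
      rw [hA1, hB1]
      simp only []
      refine congrArg (PySem.Str.join "")
        (render_eq n hn0 dA dB (PySem.Int.mod (-(sumr record)) n)
          (PySem.Int.mod_nonneg _ hn0) (PySem.Int.mod_lt _ hn0) ?_)
      intro j hj0 hj1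
      rw [hB2 j, hA2 _, assign_transfer n hn0 record hcon j hj0 hj1]
    · have hbncon : ¬ consistent (bp n 0 record.reverse) :=
        fun h => hcon ((consistent_transfer n hn0 record).2 h)
      rw [hAc.2 hcon, hBc.2 hbncon]
  · have hrecnil : record = [] := hn.resolve_left hpos
    subst hrecnil
    simp [solution, solution_alt, solLoop, altLoop, PySem.Dict.getD_empty,
      PySem.List.slice_from _ le_rfl, PySem.List.slice_to _ le_rfl,
      pyRange01, List.map_map, Function.comp_def, List.map_const',
      PySem.List.pyRepeat_singleton]
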